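-- pv_equiv track=rewrite | github.com/alex3000silvac-ai/Agente_Digital_v2 | agente_digital_api/app/modules/incidentes/sistema_dinamico.py | _calcular_estado_seccion
-- ===== SOURCE A (Python) =====
-- def _calcular_estado_seccion(datos: dict) -> str:
--     if not datos:
--         return 'VACIO'
--     # Contar campos llenos
--     campos_llenos = sum(1 for v in datos.values() if v)
--     total_campos = len(datos)
--     if campos_llenos == 0:
--         return 'VACIO'
--     elif campos_llenos == total_campos:
--         return 'COMPLETO'
--     else:
--         return 'PARCIAL'
-- ===== SOURCE B (Python) =====
-- def _calcular_estado_seccion(datos: dict) -> str: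
--     if not datos:
--         return 'VACIO'
--     if all(datos.values()):
--         return 'COMPLETO'
--     if any(datos.values()):
--         return 'PARCIAL'
--     return 'VACIO'
-- ===== Notes on version B (the rewrite author's own statement) =====
-- stated objective: idiomatic
-- what changed: Replaces the tally of filled fields compared against len(datos) with short-circuiting all()/any() quantifiers over the values; no count is maintained.
import Mathlib
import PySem

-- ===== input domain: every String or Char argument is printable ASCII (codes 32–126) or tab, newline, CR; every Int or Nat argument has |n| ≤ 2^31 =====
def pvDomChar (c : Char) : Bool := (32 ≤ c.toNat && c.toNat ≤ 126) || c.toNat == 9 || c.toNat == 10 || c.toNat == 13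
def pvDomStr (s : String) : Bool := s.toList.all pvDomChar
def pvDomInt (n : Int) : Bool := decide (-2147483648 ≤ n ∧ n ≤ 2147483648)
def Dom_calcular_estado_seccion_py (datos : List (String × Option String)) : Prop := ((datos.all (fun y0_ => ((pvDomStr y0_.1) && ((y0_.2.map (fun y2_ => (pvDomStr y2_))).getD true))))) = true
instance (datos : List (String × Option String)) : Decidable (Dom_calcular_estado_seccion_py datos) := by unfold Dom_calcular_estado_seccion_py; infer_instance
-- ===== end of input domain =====

-- B replaces A's tally-vs-length classification with all()/any() quantifiers over the values (idiomatic; same cost).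

-- truthiness of a Python value that is None or a str: None and "" are falsy
def pvTruthy (v : Option String) : Bool :=
  match v with
  | none => false
  | some s => !(s == "")

-- ===== PORT A =====
def calcular_estado_seccion_py (datos : List (String × Option String)) : String :=
  if datos = [] then "VACIO"
  else
    let campos_llenos : Int :=
      (datos.map (·.2)).foldl (fun acc v => if pvTruthy v then acc + 1 else acc) 0
    let total_campos : Int := (datos.length : Int)
    if campos_llenos = 0 then "VACIO"
    else if campos_llenos = total_campos then "COMPLETO"
    else "PARCIAL"

-- ===== PORT B =====
def calcular_estado_seccion_py_alt (datos : List (String × Option String)) : String :=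
  if datos = [] then "VACIO"
  else if (datos.map (·.2)).all pvTruthy then "COMPLETO"
  else if (datos.map (·.2)).any pvTruthy then "PARCIAL"
  else "VACIO"

-- ===== PRECONDITION & SPEC =====
def Spec_calcular_estado_seccion_py (datos : List (String × Option String)) (out : String) : Prop := out = calcular_estado_seccion_py_alt datos
instance (datos : List (String × Option String)) (out : String) : Decidable (Spec_calcular_estado_seccion_py datos out) := by unfold Spec_calcular_estado_seccion_py; infer_instance

-- ===== CLAIM (what is proved, stated in full; the proofs are below) =====
def Claim_equal_calcular_estado_seccion_py : Prop := ∀ (datos : List (String × Option String)), Dom_calcular_estado_seccion_py datos → Spec_calcular_estado_seccion_py datos (calcular_estado_seccion_py datos)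

-- ===== LEMMAS AND PROOFS =====

-- ===== VERDICT (by name: the statement is the Claim_ definition above) =====
theorem calcular_estado_seccion_py_spec : Claim_equal_calcular_estado_seccion_py := by
  intro datos _
  unfold Spec_calcular_estado_seccion_py calcular_estado_seccion_py calcular_estado_seccion_py_alt
  by_cases hnil : datos = []
  · simp [hnil]
  · simp only [hnil, if_false]
    set vs := datos.map (·.2) with hvs
    have hlen : vs.length = datos.length := by simp [hvs]
    rw [PySem.List.foldl_if_add_one]
    by_cases hall : vs.all pvTruthy
    · have hc : vs.countP pvTruthy = vs.length := List.countP_eq_length.2 (by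
        intro a ha; exact (List.all_eq_true.1 hall) a ha)
      have hpos : vs.length ≠ 0 := by simp [hvs]; exact hnil
      simp only [hall, if_true]
      split_ifs <;> first | rfl | (exfalso; omega)
    · have hcl : vs.countP pvTruthy ≠ vs.length := by
        rw [Ne, List.countP_eq_length]
        intro h
        exact hall (List.all_eq_true.2 (by intro x hx; exact h x hx))
      by_cases hany : vs.any pvTruthy
      · have hc0 : vs.countP pvTruthy ≠ 0 := by
          rw [Ne, List.countP_eq_zero]
          push_neg
          rcases List.any_eq_true.1 hany with ⟨a, ha, hpa⟩
          exact ⟨a, ha, by simp [hpa]⟩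
        simp only [hall, hany, if_false, if_true]
        split_ifs <;> first | rfl | (exfalso; omega)
      · have hc : vs.countP pvTruthy = 0 := by
          apply List.countP_eq_zero.2
          intro a ha
          by_contra hpa
          exact hany (List.any_eq_true.2 ⟨a, ha, by simpa using hpa⟩)
        simp only [hall, hany, if_false]
        split_ifs <;> first | rfl | (exfalso; omega)
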